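-- pv_equiv track=rewrite | github.com/bitwisecook/tcl-lsp | core/xc/translator.py | _is_http_getter
-- ===== SOURCE A (Python) =====
-- def _extract_command_name(text: str) -> str | None:
--     """Extract the command name from a ``[CMD ...]`` substitution text."""
--     text = text.strip()
--     if text.startswith("[") and text.endswith("]"):
--         text = text[1:-1].strip()
--     parts = text.split()
--     return parts[0] if parts else None
--
-- def _is_http_getter(text: str) -> str | None:
--     """If *text* is a ``[HTTP::xxx]`` getter, return the command name.
--
--     Also recognises ``[string tolower [HTTP::xxx]]`` and
--     ``[string toupper [HTTP::xxx]]`` as case-insensitive wrappers.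
--     """
--     cmd = _extract_command_name(text)
--     if cmd and cmd.startswith("HTTP::"):
--         return cmd
--     # Handle [string tolower/toupper [HTTP::xxx]]
--     if cmd == "string":
--         inner = text.strip()
--         if inner.startswith("[") and inner.endswith("]"):
--             inner = inner[1:-1].strip()
--         parts = inner.split(None, 2)
--         if len(parts) >= 3 and parts[1] in ("tolower", "toupper"):
--             return _is_http_getter(parts[2])
--     return None
-- ===== SOURCE B (Python) =====
-- def _is_http_getter(text: str) -> str | None:
--     """Iterative re-implementation: peel all ``[string tolower/toupper ...]``
--     wrapper layers in a loop, then do a single HTTP:: check on what is left."""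
--     current = text
--     while True:
--         inner = current.strip()
--         if inner.startswith("[") and inner.endswith("]"):
--             inner = inner[1:-1].strip()
--         parts = inner.split(None, 2)
--         if len(parts) >= 3 and parts[0] == "string" and parts[1] in ("tolower", "toupper"):
--             current = parts[2]
--         else:
--             break
--     stripped = current.strip()
--     if stripped.startswith("[") and stripped.endswith("]"):
--         stripped = stripped[1:-1].strip()
--     parts = stripped.split()
--     if parts and parts[0].startswith("HTTP::"):
--         return parts[0]
--     return None
-- ===== Notes on version B (the rewrite author's own statement) =====
-- stated objective: alternative
-- what changed: Replaced the tail recursion with an iterative peeling loop that strips all [string tolower/toupper ...] wrapper layers first and then performs a single final HTTP:: prefix check on the innermost text, instead of re-checking HTTP:: before each recursive descent.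
import Mathlib
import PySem

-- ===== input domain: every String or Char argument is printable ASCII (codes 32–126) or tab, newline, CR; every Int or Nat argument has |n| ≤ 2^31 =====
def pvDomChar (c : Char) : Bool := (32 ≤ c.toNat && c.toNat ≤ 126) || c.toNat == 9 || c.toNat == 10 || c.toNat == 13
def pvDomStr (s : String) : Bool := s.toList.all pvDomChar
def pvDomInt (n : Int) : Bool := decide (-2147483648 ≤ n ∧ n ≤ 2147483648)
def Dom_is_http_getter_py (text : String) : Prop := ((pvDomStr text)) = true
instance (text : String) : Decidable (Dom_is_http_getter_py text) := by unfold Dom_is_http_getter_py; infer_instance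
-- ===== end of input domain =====

-- B rewrites A's tail recursion as an iterative wrapper-peeling loop followed by one final HTTP:: check (alternative decomposition, same cost).

-- B rewrites A's tail recursion as an iterative wrapper-peeling loop followed by one final HTTP:: check (alternative decomposition, same cost).

-- shared helper for both ports: the "strip, then strip one [ ] layer and re-strip" step,
-- which BOTH Pythons inline verbatim (A in _extract_command_name and its wrapper branch, B in its loop and final check)
def strip_bracketed (t : String) : String :=
  let i := PySem.Str.strip t
  if PySem.Str.startswith i "[" && PySem.Str.endswith i "]" then
    PySem.Str.strip (PySem.Str.slice i (some 1) (some (-1))) else i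

-- ===== PORT A =====
-- helper: _extract_command_name (parts[0] if parts else None = head?)
def extract_command_name (text : String) : Option String :=
  (PySem.Str.split₀ (strip_bracketed text)).head?

-- fuel is a totality guard only: each recursive call is on a strictly shorter string
def is_http_getter_go : Nat → String → Option String
  | 0, _ => none
  | fuel+1, text =>
    let cmd := extract_command_name text
    let c := cmd.getD ""
    if (!(c == "")) && PySem.Str.startswith c "HTTP::" then cmd
    else if cmd == some "string" then
      let parts := PySem.Str.split₀Max (strip_bracketed text) 2
      if decide (3 ≤ parts.length) &&
         (parts.getD 1 "" == "tolower" || parts.getD 1 "" == "toupper") then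
        is_http_getter_go fuel (parts.getD 2 "")
      else none
    else none

def is_http_getter_py (text : String) : Option String :=
  is_http_getter_go (text.length + 1) text

-- ===== PORT B =====
-- final check after the peeling loop: does the innermost text name an HTTP:: command?
def final_http_check (current : String) : Option String :=
  let parts := PySem.Str.split₀ (strip_bracketed current)
  match parts.head? with
  | some c => if PySem.Str.startswith c "HTTP::" then some c else none
  | none => none

-- the while-True loop; fuel is a totality guard only (none = fuel exhausted, never reached from the wrapper)
def peel_loop : Nat → String → Option String
  | 0, _ => none
  | fuel+1, current =>
    let parts := PySem.Str.split₀Max (strip_bracketed current) 2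
    if decide (3 ≤ parts.length) && parts.getD 0 "" == "string" &&
       (parts.getD 1 "" == "tolower" || parts.getD 1 "" == "toupper") then
      peel_loop fuel (parts.getD 2 "")
    else some current

-- unwrap the fuel guard (none = fuel exhausted, unreachable) and run the final check
def apply_final (r : Option String) : Option String :=
  match r with
  | some current => final_http_check current
  | none => none

def is_http_getter_py_alt (text : String) : Option String :=
  apply_final (peel_loop (text.length + 1) text)

-- ===== PRECONDITION & SPEC =====
def Spec_is_http_getter_py (text : String) (out : Option String) : Prop := out = is_http_getter_py_alt text
instance (text : String) (out : Option String) : Decidable (Spec_is_http_getter_py text out) := by unfold Spec_is_http_getter_py; infer_instance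

-- ===== CLAIM (what is proved, stated in full; the proofs are below) =====
def Claim_equal_is_http_getter_py : Prop := ∀ (text : String), Dom_is_http_getter_py text → Spec_is_http_getter_py text (is_http_getter_py text)

-- ===== LEMMAS AND PROOFS =====

theorem go_acc (s : List Char) : ∀ cur acc, PySem.Chars.split₀.go s cur acc = acc.reverse ++ PySem.Chars.split₀.go s cur [] := by
  induction s with
  | nil => intro cur acc; by_cases h : cur.isEmpty <;> simp [PySem.Chars.split₀.go, h]
  | cons c rest ih =>
    intro cur acc
    by_cases hs : PySem.Chars.isspace c
    · by_cases hc : cur.isEmpty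
      · simp only [PySem.Chars.split₀.go, hs, hc, if_true]
        exact ih [] acc
      · simp only [PySem.Chars.split₀.go, hs, hc, if_true, Bool.false_eq_true, ite_false]
        rw [ih [] (cur.reverse :: acc), ih [] [cur.reverse]]
        simp
    · simp only [PySem.Chars.split₀.go, hs, Bool.false_eq_true, ite_false]
      exact ih (c :: cur) acc

theorem g2 (s : List Char) : ∀ (w : List Char), w ≠ [] →
    (PySem.Chars.split₀.go s w []).head? = some (w.reverse ++ s.takeWhile (fun c => !PySem.Chars.isspace c)) := by
  induction s with
  | nil => intro w hw; simp [PySem.Chars.split₀.go, List.isEmpty_iff, hw]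
  | cons c rest ih =>
    intro w hw
    by_cases hs : PySem.Chars.isspace c
    · simp only [PySem.Chars.split₀.go, hs, if_true, List.isEmpty_iff,
        List.takeWhile_cons, Bool.not_true]
      rw [if_neg (by simp [hw]), go_acc]
      simp [hs]
    · simp only [PySem.Chars.split₀.go, hs, Bool.false_eq_true, ite_false, List.takeWhile_cons]
      rw [ih (c :: w) (by simp)]
      simp [hs]

theorem head_split₀ (s : List Char) :
    (PySem.Chars.split₀ s).head? =
      (match s.dropWhile PySem.Chars.isspace with
       | [] => none
       | l' => some (l'.takeWhile (fun c => !PySem.Chars.isspace c))) := by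
  induction s with
  | nil => simp [PySem.Chars.split₀, PySem.Chars.split₀.go]
  | cons c rest ih =>
    by_cases hs : PySem.Chars.isspace c
    · simpa [PySem.Chars.split₀, PySem.Chars.split₀.go, hs] using ih
    · simp only [PySem.Chars.split₀, PySem.Chars.split₀.go, hs, Bool.false_eq_true, ite_false,
        List.dropWhile_cons, List.takeWhile_cons]
      rw [g2 rest [c] (by simp)]
      simp [hs]

theorem maxgo_acc (fuel : Nat) : ∀ m l acc, PySem.Chars.split₀Max.go fuel m l acc =
    acc.reverse ++ PySem.Chars.split₀Max.go fuel m l [] := by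
  induction fuel with
  | zero => intro m l acc; simp [PySem.Chars.split₀Max.go]
  | succ fuel ih =>
    intro m l acc
    cases h : List.dropWhile PySem.Chars.isspace l with
    | nil => simp [PySem.Chars.split₀Max.go, h]
    | cons x xs =>
      by_cases hm : m = 0
      · simp [PySem.Chars.split₀Max.go, h, hm]
      · simp only [PySem.Chars.split₀Max.go, h, if_neg hm]
        rw [ih _ _ ((List.takeWhile (fun c => !PySem.Chars.isspace c) (x :: xs)) :: acc),
            ih _ _ [List.takeWhile (fun c => !PySem.Chars.isspace c) (x :: xs)]]
        simp

theorem head_split₀Max2 (s : List Char) :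
    (PySem.Chars.split₀Max s 2).head? =
      (match s.dropWhile PySem.Chars.isspace with
       | [] => none
       | l' => some (l'.takeWhile (fun c => !PySem.Chars.isspace c))) := by
  unfold PySem.Chars.split₀Max
  rw [if_neg (by norm_num)]
  show (PySem.Chars.split₀Max.go (s.length + 1) 2 s []).head? = _
  cases h : List.dropWhile PySem.Chars.isspace s with
  | nil => simp [PySem.Chars.split₀Max.go, h]
  | cons x xs =>
    simp only [PySem.Chars.split₀Max.go, h]
    rw [maxgo_acc]
    simp

-- the first whitespace word is the same whether the split is capped at 2 or not
theorem heads_eq (s : String) :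
    (PySem.Str.split₀ s).head? = (PySem.Str.split₀Max s 2).head? := by
  simp [PySem.Str.split₀, PySem.Str.split₀Max, List.head?_map, head_split₀, head_split₀Max2]

theorem startswith_ne_empty (c : String) (h : PySem.Str.startswith c "HTTP::" = true) :
    (c == "") = false := by
  cases hq : c == "" with
  | false => rfl
  | true =>
    have hce : c = "" := eq_of_beq hq
    subst hce
    exact absurd h (by decide)

theorem startswith_ne_string (c : String) (h : PySem.Str.startswith c "HTTP::" = true) :
    (c == "string") = false := by
  cases hq : c == "string" with
  | false => rfl
  | true =>
    have hce : c = "string" := eq_of_beq hq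
    subst hce
    exact absurd h (by decide)

theorem main_lemma (fuel : Nat) : ∀ (text : String),
    is_http_getter_go fuel text = apply_final (peel_loop fuel text) := by
  induction fuel with
  | zero => intro text; simp [is_http_getter_go, peel_loop, apply_final]
  | succ fuel ih =>
    intro text
    have hhead : (PySem.Str.split₀ (strip_bracketed text)).head? =
        (PySem.Str.split₀Max (strip_bracketed text) 2).head? := heads_eq _
    cases hc : (PySem.Str.split₀ (strip_bracketed text)).head? with
    | none =>
      have hparts : PySem.Str.split₀Max (strip_bracketed text) 2 = [] :=
        List.head?_eq_none_iff.mp (hhead ▸ hc)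
      simp [is_http_getter_go, peel_loop, apply_final, extract_command_name, final_http_check,
        hc, hparts]
    | some c =>
      obtain ⟨t', hp⟩ : ∃ t', PySem.Str.split₀Max (strip_bracketed text) 2 = c :: t' := by
        cases hq : PySem.Str.split₀Max (strip_bracketed text) 2 with
        | nil => rw [hq, hc] at hhead; simp at hhead
        | cons a b =>
          refine ⟨b, ?_⟩
          rw [hq, hc] at hhead
          simp at hhead
          rw [hhead]
      by_cases hhttp : PySem.Str.startswith c "HTTP::"
      · simp [is_http_getter_go, peel_loop, apply_final, extract_command_name, final_http_check,
          hc, hp, hhttp, startswith_ne_empty c hhttp, startswith_ne_string c hhttp]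
      · have hh2 : PySem.Chars.startswith c.toList ['H','T','T','P',':',':'] = false := by
          simpa [PySem.Str.startswith] using eq_false_of_ne_true hhttp
        by_cases hcs : c = "string"
        · subst hcs
          by_cases hcond : (decide (3 ≤ ("string" :: t').length) &&
              (("string" :: t').getD 1 "" == "tolower" ||
               ("string" :: t').getD 1 "" == "toupper")) = true
          · simp only [is_http_getter_go, peel_loop, extract_command_name, hc, hp,
              Option.getD_some, hhttp, Bool.and_false, Bool.false_eq_true, if_false, ite_false,
              List.getD_cons_zero, beq_self_eq_true, Bool.and_true, Bool.true_and, hcond,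
              if_true, ite_true]
            exact ih _
          · simp only [is_http_getter_go, peel_loop, apply_final, extract_command_name,
              final_http_check, hc, hp, Option.getD_some, List.getD_cons_zero, beq_self_eq_true,
              Bool.and_true, Bool.true_and, eq_false_of_ne_true hcond, eq_false_of_ne_true hhttp,
              Bool.and_false, Bool.false_eq_true, if_false, ite_false, ite_self]
        · have hcsb : (c == "string") = false := by
            cases hq : c == "string" with
            | false => rfl
            | true => exact absurd (eq_of_beq hq) hcs
          simp [is_http_getter_go, peel_loop, apply_final, extract_command_name, final_http_check,
            hc, hp, hhttp, hh2, hcsb]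

-- ===== VERDICT (by name: the statement is the Claim_ definition above) =====
theorem is_http_getter_py_spec : Claim_equal_is_http_getter_py := by
  intro text _
  unfold Spec_is_http_getter_py is_http_getter_py is_http_getter_py_alt
  exact main_lemma (text.length + 1) text
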